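-- pv_equiv track=rewrite | github.com/bubacoder/infra | docs/web/compose_processor.py | _parse_compose_lines
-- ===== SOURCE A (Python) =====
-- def _parse_compose_lines(lines: list[str]) -> tuple[list[str], list[str]]:
--     """Parse compose file lines into head comments and YAML content.
--
--     Args:
--         lines: List of lines from the compose file
--
--     Returns:
--         Tuple of (head_lines, yaml_lines)
--     """
--     head_lines = []
--     yaml_lines = []
--     yaml_started = False
--
--     for line in lines:
--         if yaml_started:
--             yaml_lines.append(line)
--         elif line.strip() == "---":
--             yaml_started = True
--         elif line.startswith("# "):
--             head_lines.append(line[2:])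
--         elif line.startswith("#"):
--             head_lines.append(line[1:])
--
--     return head_lines, yaml_lines
-- ===== SOURCE B (Python) =====
-- def _parse_compose_lines(lines: list[str]) -> tuple[list[str], list[str]]:
--     """Parse compose file lines into head comments and YAML content."""
--     idx = next((i for i, line in enumerate(lines) if line.strip() == "---"), None)
--     head_src = lines if idx is None else lines[:idx]
--     yaml_lines = [] if idx is None else lines[idx + 1:]
--     head_lines = [
--         line[2:] if line.startswith("# ") else line[1:]
--         for line in head_src
--         if line.startswith("#")
--     ]
--     return head_lines, yaml_lines
-- ===== Notes on version B (the rewrite author's own statement) =====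
-- stated objective: idiomatic
-- what changed: B first locates the index of the '---' separator, slices the list into a head part and the YAML tail, and builds the head comments with a single filter-and-strip comprehension, replacing A's one-pass state-machine loop with a yaml_started flag.
import Mathlib
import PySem

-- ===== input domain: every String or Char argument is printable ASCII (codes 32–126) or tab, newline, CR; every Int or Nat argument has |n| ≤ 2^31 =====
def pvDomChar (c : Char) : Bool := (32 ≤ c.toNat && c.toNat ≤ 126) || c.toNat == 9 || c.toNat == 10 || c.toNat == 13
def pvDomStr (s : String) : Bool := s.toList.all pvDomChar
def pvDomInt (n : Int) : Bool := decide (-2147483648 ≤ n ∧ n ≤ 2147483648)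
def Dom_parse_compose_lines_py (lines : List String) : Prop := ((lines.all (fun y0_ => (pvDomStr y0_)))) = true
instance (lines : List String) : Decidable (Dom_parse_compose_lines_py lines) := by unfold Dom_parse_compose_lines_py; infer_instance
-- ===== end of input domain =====

-- B locates the '---' separator index, slices off the YAML tail, and builds the head
-- comments with one filter-and-map pass, replacing A's one-pass loop with a yaml_started flag.


-- ===== PORT A =====
-- loop body of A's for-loop over (head_lines, yaml_lines, yaml_started)
def pvStepA (st : List String × List String × Bool) (line : String) : List String × List String × Bool :=
  if st.2.2 then (st.1, st.2.1 ++ [line], st.2.2)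
  else if PySem.Str.strip line == "---" then (st.1, st.2.1, true)
  else if PySem.Str.startswith line "# " then (st.1 ++ [PySem.Str.slice line (some 2) none], st.2.1, st.2.2)
  else if PySem.Str.startswith line "#" then (st.1 ++ [PySem.Str.slice line (some 1) none], st.2.1, st.2.2)
  else st

def parse_compose_lines_py (lines : List String) : List String × List String :=
  let r := lines.foldl pvStepA ([], [], false)
  (r.1, r.2.1)

-- ===== PORT B =====
-- the head-comment comprehension of Source B
def pvHeadB (ls : List String) : List String :=
  (ls.filter (fun line => PySem.Str.startswith line "#")).map
    (fun line => if PySem.Str.startswith line "# " then PySem.Str.slice line (some 2) none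
                 else PySem.Str.slice line (some 1) none)

def parse_compose_lines_py_alt (lines : List String) : List String × List String :=
  match lines.findIdx? (fun line => PySem.Str.strip line == "---") with
  | none => (pvHeadB lines, [])
  | some i => (pvHeadB (lines.take i), lines.drop (i + 1))

-- ===== PRECONDITION & SPEC =====
def Spec_parse_compose_lines_py (lines : List String) (out : List String × List String) : Prop := out = parse_compose_lines_py_alt lines
instance (lines : List String) (out : List String × List String) : Decidable (Spec_parse_compose_lines_py lines out) := by unfold Spec_parse_compose_lines_py; infer_instance

-- ===== CLAIM (what is proved, stated in full; the proofs are below) =====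
def Claim_equal_parse_compose_lines_py : Prop := ∀ (lines : List String), Dom_parse_compose_lines_py lines → Spec_parse_compose_lines_py lines (parse_compose_lines_py lines)

-- ===== LEMMAS AND PROOFS =====

-- once yaml_started is true, A's loop just appends every remaining line to yaml_lines
lemma pvFoldA_started (ls : List String) (head yaml : List String) :
    ls.foldl pvStepA (head, yaml, true) = (head, yaml ++ ls, true) := by
  induction ls generalizing yaml with
  | nil => simp
  | cons l ls ih => simp [pvStepA, ih]

lemma pvHeadB_cons (l : String) (ls : List String) :
    pvHeadB (l :: ls) =
      (if PySem.Str.startswith l "#" then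
        [if PySem.Str.startswith l "# " then PySem.Str.slice l (some 2) none
         else PySem.Str.slice l (some 1) none] else []) ++ pvHeadB ls := by
  by_cases h : PySem.Chars.startswith l.toList ['#'] = true <;> simp [pvHeadB, h]

-- '# ' prefix implies '#' prefix
lemma pvSw_trans (cs : List Char) (h : PySem.Chars.startswith cs ['#', ' '] = true) :
    PySem.Chars.startswith cs ['#'] = true := by
  simp only [PySem.Chars.startswith, List.isPrefixOf_iff_prefix] at *
  exact List.IsPrefix.trans (by simp) h

-- main invariant: A's loop from a not-yet-started state equals B's split computed on the suffix
lemma pvFoldA_main (ls : List String) (head yaml : List String) :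
    ls.foldl pvStepA (head, yaml, false) =
      match ls.findIdx? (fun line => PySem.Str.strip line == "---") with
      | none => (head ++ pvHeadB ls, yaml, false)
      | some i => (head ++ pvHeadB (ls.take i), yaml ++ ls.drop (i + 1), true) := by
  induction ls generalizing head yaml with
  | nil => simp [pvHeadB]
  | cons l ls ih =>
    by_cases hsep : (PySem.Str.strip l == "---") = true
    · simp [List.findIdx?_cons, hsep, pvStepA, pvFoldA_started, pvHeadB]
    · have hsep' : (PySem.Str.strip l == "---") = false := by simpa using hsep
      rw [List.foldl_cons]
      have hstep : pvStepA (head, yaml, false) l =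
          ((if PySem.Chars.startswith l.toList ['#'] then
              head ++ [if PySem.Chars.startswith l.toList ['#', ' '] then PySem.Str.slice l (some 2) none
                       else PySem.Str.slice l (some 1) none] else head), yaml, false) := by
        by_cases h2 : PySem.Chars.startswith l.toList ['#', ' '] = true
        · have h1 : PySem.Chars.startswith l.toList ['#'] = true := pvSw_trans l.toList h2
          simp [pvStepA, hsep', h2, h1]
        · by_cases h1 : PySem.Chars.startswith l.toList ['#'] = true
          · simp [pvStepA, hsep', h2, h1]
          · simp [pvStepA, hsep', h2, h1]
      rw [hstep, ih]
      cases hf : ls.findIdx? (fun line => PySem.Str.strip line == "---") with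
      | none =>
        simp [List.findIdx?_cons, hsep', hf, pvHeadB_cons]
        split_ifs <;> simp
      | some i =>
        simp [List.findIdx?_cons, hsep', hf, pvHeadB_cons, List.take_succ_cons]
        split_ifs <;> simp

-- ===== VERDICT (by name: the statement is the Claim_ definition above) =====
theorem parse_compose_lines_py_spec : Claim_equal_parse_compose_lines_py := by
  intro lines _
  unfold Spec_parse_compose_lines_py parse_compose_lines_py parse_compose_lines_py_alt
  rw [pvFoldA_main]
  cases hf : lines.findIdx? (fun line => PySem.Str.strip line == "---") <;> simp
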